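-- pv_equiv track=rewrite | github.com/YingjieQiao/Misc | calendar/calendar.py | construct_cal_month
-- ===== SOURCE A (Python) =====
-- def leap_year(year):
--     if year%4 != 0:
--         return False
--     elif year%100 != 0:
--         return True
--     elif year%400 != 0:
--         return False
--     else:
--         return True
--
-- def num_days_in_month(month_num, leap_year):
--     month = {1: 31, 3:31, 4:30, 5:31, 6:30, 7:31, 8:31, 9:30, 10:31, 11:30, 12:31}
--     if month_num == 2:
--         if leap_year:
--             return 29
--         else:
--             return 28
--     else:
--         return month[month_num]
--
-- def construct_cal_month(month_num, first_day_of_month, num_days_in_month):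
--     #formatting takes time man
--     month = {
--         1: 'January',
--         2: 'February',
--         3: 'March',
--         4: 'April',
--         5: 'May',
--         6: 'June',
--         7: 'July',
--         8: 'August',
--         9: 'September',
--         10: 'October',
--         11: 'November',
--         12: 'December'
--     }
--     week1 = "   "*first_day_of_month
--     for i in range(7-first_day_of_month):
--         week1 += "  "
--         week1 += str(i+1)
--
--     out = [month[month_num], week1] #line by line, first line is mon+week1
--     n = num_days_in_month - (7-first_day_of_month) #days left
--
--     weekn= ""
--     i = 0
--     while n>0:
--         weekn += ' '
--
--         if num_days_in_month+1-n < 10: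
--             weekn += ' '
--
--         weekn += str(num_days_in_month+1-n)
--         i += 1
--         n -= 1
--         if i == 7:
--             out.append(weekn)
--             i = 0
--             weekn = ''
--     if weekn != '':
--         out.append(weekn)
--     return out
-- ===== SOURCE B (Python) =====
-- def construct_cal_month(month_num, first_day_of_month, num_days_in_month):
--     # Build-then-chunk: one flat list of day cells, grouped 7 per line.
--     names = ['January', 'February', 'March', 'April', 'May', 'June', 'July',
--              'August', 'September', 'October', 'November', 'December']
--     f = first_day_of_month
--     week1 = '   ' * f + ''.join('  ' + str(d) for d in range(1, 8 - f))
--     cells = [' ' + (' ' if d < 10 else '') + str(d)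
--              for d in range(8 - f, num_days_in_month + 1)]
--     weeks = []
--     i = 0
--     while i < len(cells):
--         weeks.append(''.join(cells[i:i+7]))
--         i += 7
--     return [names[month_num - 1], week1] + weeks
-- ===== Notes on version B (the rewrite author's own statement) =====
-- stated objective: simpler
-- what changed: A interleaves formatting with control flow (a special-cased first-week loop, then a while loop with a day countdown and a cells-per-line counter that flushes lines mid-loop); B builds one flat list of 3-char day cells and then chunks it 7 per line, so the counter and the mid-loop flush disappear.
import Mathlib
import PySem

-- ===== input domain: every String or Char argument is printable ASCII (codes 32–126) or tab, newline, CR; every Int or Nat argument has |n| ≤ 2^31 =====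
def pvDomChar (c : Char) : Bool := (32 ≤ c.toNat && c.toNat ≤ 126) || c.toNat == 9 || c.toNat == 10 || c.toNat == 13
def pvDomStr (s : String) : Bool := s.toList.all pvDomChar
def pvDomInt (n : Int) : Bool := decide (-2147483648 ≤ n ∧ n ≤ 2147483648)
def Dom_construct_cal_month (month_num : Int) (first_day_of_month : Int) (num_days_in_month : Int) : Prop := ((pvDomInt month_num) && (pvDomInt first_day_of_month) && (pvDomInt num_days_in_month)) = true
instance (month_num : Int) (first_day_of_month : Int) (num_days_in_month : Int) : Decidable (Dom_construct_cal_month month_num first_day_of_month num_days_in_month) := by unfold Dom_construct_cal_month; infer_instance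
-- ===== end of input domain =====

-- B replaces A's interleaved week1 special case and while/counter loop by a flat
-- build-then-chunk decomposition (same cost; objective: simpler).


-- ===== PORT A =====
-- Strings built by +=/concatenation are modelled as List Char (Lean's String.append is
-- kernel-opaque); each finished line becomes a String via String.ofList — exact for ASCII text.
def pvMonthDictA : PySem.Dict Int String :=
  PySem.Dict.ofList [(1, "January"), (2, "February"), (3, "March"), (4, "April"),
    (5, "May"), (6, "June"), (7, "July"), (8, "August"), (9, "September"),
    (10, "October"), (11, "November"), (12, "December")]

-- the while loop: state (n, i, weekn, out); body order exactly as in A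
def pvLoopA (nd : Int) (n : Int) (i : Int) (weekn : List Char) (out : List String) : List String :=
  if _h : 0 < n then
    let weekn := weekn ++ [' '] ++ (if nd + 1 - n < 10 then [' '] else []) ++ PySem.Int.toChars (nd + 1 - n)
    let i := i + 1
    let n := n - 1
    if i = 7 then pvLoopA nd n 0 [] (out ++ [String.ofList weekn])
    else pvLoopA nd n i weekn out
  else if weekn ≠ [] then out ++ [String.ofList weekn] else out
termination_by n.toNat
decreasing_by all_goals omega

def construct_cal_month (month_num : Int) (first_day_of_month : Int) (num_days_in_month : Int) : List String :=
  match pvMonthDictA.get? month_num with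
  | none => []   -- Python raises KeyError here; excluded by Pre_
  | some name =>
    -- week1 = "   "*first_day_of_month, then for i in range(7-f): week1 += "  " + str(i+1)
    let week1 : List Char :=
      (PySem.List.pyRange 0 (7 - first_day_of_month) 1).foldl
        (fun s i => s ++ [' ', ' '] ++ PySem.Int.toChars (i + 1))
        (List.flatten (List.replicate first_day_of_month.toNat [' ', ' ', ' ']))
        -- "   " * f is empty for f ≤ 0, exactly List.replicate f.toNat
    let out := [name, String.ofList week1]
    pvLoopA num_days_in_month (num_days_in_month - (7 - first_day_of_month)) 0 [] out

-- ===== PORT B =====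
def pvNamesB : List String :=
  ["January", "February", "March", "April", "May", "June", "July",
   "August", "September", "October", "November", "December"]

-- i = 0; while i < len(cells): weeks.append(''.join(cells[i:i+7])); i += 7
-- ''.join on a list of strings is List.flatten on the char lists (exact)
def pvChunkLoopB (cells : List (List Char)) (i : Int) : List String :=
  if _h : i < (cells.length : Int) then
    String.ofList (PySem.List.slice cells (some i) (some (i + 7))).flatten :: pvChunkLoopB cells (i + 7)
  else []
termination_by ((cells.length : Int) - i).toNat
decreasing_by omega

def construct_cal_month_alt (month_num : Int) (first_day_of_month : Int) (num_days_in_month : Int) : List String :=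
  match PySem.List.pyGet? pvNamesB (month_num - 1) with   -- names[month_num - 1]
  | none => []   -- Python raises IndexError here; excluded by Pre_
  | some name =>
    let f := first_day_of_month
    let week1 : List Char :=
      List.flatten (List.replicate f.toNat [' ', ' ', ' ']) ++
      List.flatten ((PySem.List.pyRange 1 (8 - f) 1).map (fun d => [' ', ' '] ++ PySem.Int.toChars d))
    let cells : List (List Char) :=
      (PySem.List.pyRange (8 - f) (num_days_in_month + 1) 1).map
        (fun d => [' '] ++ (if d < 10 then [' '] else []) ++ PySem.Int.toChars d)
    [name, String.ofList week1] ++ pvChunkLoopB cells 0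

-- ===== PRECONDITION & SPEC =====
-- Pre_ excludes exactly the month numbers outside 1..12, on which A raises KeyError.
def Pre_construct_cal_month (month_num : Int) (first_day_of_month : Int) (num_days_in_month : Int) : Prop :=
  1 ≤ month_num ∧ month_num ≤ 12
instance (month_num : Int) (first_day_of_month : Int) (num_days_in_month : Int) : Decidable (Pre_construct_cal_month month_num first_day_of_month num_days_in_month) := by unfold Pre_construct_cal_month; infer_instance

def pvWitness_construct_cal_month : Int × Int × Int := (9, 2, 30)

def Spec_construct_cal_month (month_num : Int) (first_day_of_month : Int) (num_days_in_month : Int) (out : List String) : Prop := out = construct_cal_month_alt month_num first_day_of_month num_days_in_month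
instance (month_num : Int) (first_day_of_month : Int) (num_days_in_month : Int) (out : List String) : Decidable (Spec_construct_cal_month month_num first_day_of_month num_days_in_month out) := by unfold Spec_construct_cal_month; infer_instance

-- ===== CLAIM (what is proved, stated in full; the proofs are below) =====
def Claim_equal_construct_cal_month : Prop := ∀ (month_num : Int) (first_day_of_month : Int) (num_days_in_month : Int), Dom_construct_cal_month month_num first_day_of_month num_days_in_month → Pre_construct_cal_month month_num first_day_of_month num_days_in_month → Spec_construct_cal_month month_num first_day_of_month num_days_in_month (construct_cal_month month_num first_day_of_month num_days_in_month)

-- ===== LEMMAS AND PROOFS =====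

-- proof-side view of B's chunk loop: groups of 7 from the front
def pvChunkB (cells : List (List Char)) : List String :=
  if cells = [] then []
  else String.ofList (cells.take 7).flatten :: pvChunkB (cells.drop 7)
termination_by cells.length
decreasing_by
  rename_i h
  have h0 : 0 < cells.length := List.length_pos_of_ne_nil h
  simp only [List.length_drop]; omega

theorem pvChunkLoopB_eq (full : List (List Char)) :
    ∀ (n i : Nat), full.length - i ≤ n →
    pvChunkLoopB full (i : Int) = pvChunkB (full.drop i) := by
  intro n
  induction n with
  | zero =>
    intro i hle
    rw [pvChunkLoopB, dif_neg (by simp; omega), List.drop_of_length_le (by omega),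
        pvChunkB.eq_def]
    simp
  | succ n ih =>
    intro i hle
    by_cases hlt : i < full.length
    · rw [pvChunkLoopB, dif_pos (by exact_mod_cast hlt)]
      rw [show ((i : Int) + 7) = (((i + 7 : Nat)) : Int) by push_cast; ring]
      rw [PySem.List.slice_natCast full, ih (i + 7) (by omega),
          show i + 7 - i = 7 by omega]
      conv_rhs => rw [pvChunkB.eq_def]
      rw [if_neg (by simp only [List.drop_eq_nil_iff]; omega)]
      rw [List.drop_drop]
    · rw [pvChunkLoopB, dif_neg (by simp; omega), List.drop_of_length_le (by omega),
          pvChunkB.eq_def]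
      simp

-- B's cell for day d
def pvCell (d : Int) : List Char := [' '] ++ (if d < 10 then [' '] else []) ++ PySem.Int.toChars d

-- the last k day-cells of the month
def pvDays (nd : Int) (k : Nat) : List (List Char) :=
  (PySem.List.pyRange (nd + 1 - k) (nd + 1) 1).map pvCell

theorem pvCell_ne_nil (d : Int) : pvCell d ≠ [] := by simp [pvCell]

theorem pvFlatten_ne_nil {cs : List (List Char)} (h : ∀ c ∈ cs, c ≠ []) (hne : cs ≠ []) :
    cs.flatten ≠ [] := by
  cases cs with
  | nil => exact absurd rfl hne
  | cons c t =>
    have hc : c ≠ [] := h c (List.mem_cons_self)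
    cases c with
    | nil => exact absurd rfl hc
    | cons a u => simp

theorem pvDays_succ (nd : Int) (k : Nat) :
    pvDays nd (k + 1) = pvCell (nd - k) :: pvDays nd k := by
  unfold pvDays
  rw [show (nd + 1 - ((k : Nat) + 1 : Nat) : Int) = nd - k by push_cast; ring,
      PySem.List.pyRange_one_cons (by omega)]
  simp [show (nd - (k : Int) + 1 : Int) = nd + 1 - k by ring]

theorem pvChunkB_cons7 (c7 rest : List (List Char)) (h : c7.length = 7) :
    pvChunkB (c7 ++ rest) = String.ofList c7.flatten :: pvChunkB rest := by
  rw [pvChunkB.eq_def,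
      if_neg (by intro h0; have := congrArg List.length h0; simp [h] at this),
      List.take_left' h, List.drop_left' h]

theorem pvLoopA_eq (nd : Int) : ∀ (k : Nat) (cs : List (List Char)) (out : List String),
    cs.length < 7 → (∀ c ∈ cs, c ≠ []) →
    pvLoopA nd (k : Int) (cs.length : Int) cs.flatten out = out ++ pvChunkB (cs ++ pvDays nd k) := by
  intro k
  induction k with
  | zero =>
    intro cs out hlen hne
    rw [pvLoopA, dif_neg (by omega)]
    have hdays : pvDays nd 0 = [] := by
      unfold pvDays
      rw [PySem.List.pyRange_one_eq_nil (by omega)]; rfl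
    rw [hdays, List.append_nil]
    by_cases hcs : cs = []
    · subst hcs
      rw [pvChunkB.eq_def]
      simp
    · rw [if_pos (pvFlatten_ne_nil hne hcs)]
      rw [pvChunkB.eq_def, if_neg hcs, List.take_of_length_le (by omega),
          List.drop_of_length_le (by omega), pvChunkB.eq_def]
      simp
  | succ k ih =>
    intro cs out hlen hne
    rw [pvLoopA]
    have hpos : (0 : Int) < ((k + 1 : Nat) : Int) := by push_cast; omega
    rw [dif_pos hpos]
    have hd : nd + 1 - ((k + 1 : Nat) : Int) = nd - k := by push_cast; ring
    have hflat : cs.flatten ++ [' '] ++ (if nd + 1 - ((k + 1 : Nat) : Int) < 10 then [' '] else []) ++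
        PySem.Int.toChars (nd + 1 - ((k + 1 : Nat) : Int)) = (cs ++ [pvCell (nd - k)]).flatten := by
      rw [hd]; simp [pvCell]
    have hn : ((k + 1 : Nat) : Int) - 1 = (k : Int) := by push_cast; ring
    by_cases h7 : (cs.length : Int) + 1 = 7
    · rw [if_pos h7, hflat, hn]
      have := ih [] (out ++ [String.ofList (cs ++ [pvCell (nd - k)]).flatten]) (by simp) (by simp)
      simp only [List.length_nil, Nat.cast_zero, List.flatten_nil, List.nil_append] at this
      rw [this]
      rw [pvDays_succ, show cs ++ pvCell (nd - (k : Int)) :: pvDays nd k = (cs ++ [pvCell (nd - (k : Int))]) ++ pvDays nd k by simp]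
      rw [pvChunkB_cons7 _ _ (by simp; omega)]
      simp
    · rw [if_neg h7, hflat, hn]
      have hlen' : (cs ++ [pvCell (nd - k)]).length < 7 := by simp at h7 ⊢; omega
      have hne' : ∀ c ∈ cs ++ [pvCell (nd - k)], c ≠ [] := by
        intro c hc
        rcases List.mem_append.mp hc with h | h
        · exact hne c h
        · simp at h; subst h; exact pvCell_ne_nil _
      have := ih (cs ++ [pvCell (nd - k)]) out hlen' hne'
      rw [show ((cs ++ [pvCell (nd - k)]).length : Int) = (cs.length : Int) + 1 by simp] at this
      rw [this, pvDays_succ]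
      simp

theorem pvName_eq (m : Int) (h1 : 1 ≤ m) (h2 : m ≤ 12) :
    pvMonthDictA.get? m = PySem.List.pyGet? pvNamesB (m - 1) := by
  interval_cases m <;> rfl

theorem pvFoldl_append (g : Int → List Char) :
    ∀ (l : List Int) (init : List Char),
    l.foldl (fun s i => s ++ g i) init = init ++ (l.map g).flatten := by
  intro l
  induction l with
  | nil => simp
  | cons x t ih => intro init; simp [ih]

theorem pvWeek1_eq (f : Int) :
    (PySem.List.pyRange 0 (7 - f) 1).foldl
      (fun s i => s ++ [' ', ' '] ++ PySem.Int.toChars (i + 1))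
      (List.flatten (List.replicate f.toNat [' ', ' ', ' ']))
    = List.flatten (List.replicate f.toNat [' ', ' ', ' ']) ++
      List.flatten ((PySem.List.pyRange 1 (8 - f) 1).map (fun d => [' ', ' '] ++ PySem.Int.toChars d)) := by
  have : ∀ (s : List Char) (i : Int),
      s ++ [' ', ' '] ++ PySem.Int.toChars (i + 1) = s ++ ([' ', ' '] ++ PySem.Int.toChars (i + 1)) := by
    simp
  simp only [this]
  rw [pvFoldl_append (fun i => [' ', ' '] ++ PySem.Int.toChars (i + 1))]
  congr 1
  rw [PySem.List.pyRange_one 0 (7 - f), PySem.List.pyRange_one 1 (8 - f),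
      show (8 - f - 1 : Int) = 7 - f by ring, show (7 - f - 0 : Int) = 7 - f by ring]
  simp only [List.map_map]
  congr 1
  apply List.map_congr_left
  intro k hk
  simp only [Function.comp]
  congr 2
  omega

-- ===== VERDICT (by name: the statement is the Claim_ definition above) =====
theorem construct_cal_month_spec : Claim_equal_construct_cal_month := by
  intro m f nd _ hpre
  obtain ⟨h1, h2⟩ := hpre
  unfold Spec_construct_cal_month construct_cal_month construct_cal_month_alt
  rw [pvName_eq m h1 h2]
  cases hname : PySem.List.pyGet? pvNamesB (m - 1) with
  | none => rfl
  | some name =>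
    simp only []
    rw [pvWeek1_eq]
    -- remaining: the while loop equals the chunked cell list
    have hcells : (PySem.List.pyRange (8 - f) (nd + 1) 1).map
        (fun d => [' '] ++ (if d < 10 then [' '] else []) ++ PySem.Int.toChars d)
        = pvDays nd (nd - (7 - f)).toNat := by
      unfold pvDays pvCell
      by_cases hn : 0 < nd - (7 - f)
      · congr 2
        rw [Int.toNat_of_nonneg (by omega)]; ring
      · rw [PySem.List.pyRange_one_eq_nil (by omega),
            PySem.List.pyRange_one_eq_nil (by omega)]
    by_cases hn : 0 < nd - (7 - f)
    · have H : ∀ out, pvLoopA nd (nd - (7 - f)) 0 [] out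
          = out ++ pvChunkB (pvDays nd (nd - (7 - f)).toNat) := by
        intro out
        have := pvLoopA_eq nd (nd - (7 - f)).toNat [] out (by simp) (by simp)
        simpa [Int.toNat_of_nonneg (show (0 : Int) ≤ nd - (7 - f) by omega)] using this
      rw [H, hcells, show (0 : Int) = ((0 : Nat) : Int) by simp,
          pvChunkLoopB_eq _ (pvDays nd (nd - (7 - f)).toNat).length 0 (by omega)]
      simp
    · rw [pvLoopA]
      rw [dif_neg (by omega), if_neg (by simp)]
      rw [hcells, show (nd - (7 - f)).toNat = 0 by omega]
      have : pvDays nd 0 = [] := by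
        unfold pvDays; rw [PySem.List.pyRange_one_eq_nil (by omega)]; rfl
      rw [this, show (0 : Int) = ((0 : Nat) : Int) by simp,
          pvChunkLoopB_eq _ 0 0 (by simp), pvChunkB.eq_def]
      simp
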